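-- pv_equiv track=rewrite | github.com/ds998/ioa_materijali | ioa_domaci/8.domaci/generacije.py | f
-- ===== SOURCE A (Python) =====
-- import math
--
-- s = [173669, 275487, 1197613, 1549805, 502334, 217684, 1796841, 274708,
--      631252, 148665, 150254, 4784408, 344759, 440109, 4198037, 329673, 28602,
--      144173, 1461469, 187895, 369313, 959307, 1482335, 2772513, 1313997, 254845,
--      486167, 2667146, 264004, 297223, 94694, 1757457, 576203, 8577828, 498382,
--      8478177, 123575, 4062389, 3001419, 196884, 617991, 421056, 3017627, 131936,
--      1152730, 2676649, 656678, 4519834, 201919, 56080, 2142553, 326263, 8172117,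
--      2304253, 4761871, 205387, 6148422, 414559, 2893305, 2158562, 465972, 304078,
--      1841018, 1915571]
--
-- memory = int(math.pow(2, 26))
--
-- def f(x):
--     f_num = memory
--     ret_x = x
--     i = 0
--     while ret_x > 0:
--         if ret_x & 1 == 1:
--             f_num = f_num - s[i]
--         i = i + 1
--         ret_x = ret_x >> 1
--
--     if f_num < 0:
--         return memory
--
--     return f_num
-- ===== SOURCE B (Python) =====
-- import math
--
-- s = [173669, 275487, 1197613, 1549805, 502334, 217684, 1796841, 274708,
--      631252, 148665, 150254, 4784408, 344759, 440109, 4198037, 329673, 28602,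
--      144173, 1461469, 187895, 369313, 959307, 1482335, 2772513, 1313997, 254845,
--      486167, 2667146, 264004, 297223, 94694, 1757457, 576203, 8577828, 498382,
--      8478177, 123575, 4062389, 3001419, 196884, 617991, 421056, 3017627, 131936,
--      1152730, 2676649, 656678, 4519834, 201919, 56080, 2142553, 326263, 8172117,
--      2304253, 4761871, 205387, 6148422, 414559, 2893305, 2158562, 465972, 304078,
--      1841018, 1915571]
--
-- memory = int(math.pow(2, 26))
--
-- def f(x):
--     # Jump directly between set bits (Kernighan) instead of scanning every bit.
--     total = 0
--     y = x
--     while y > 0: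
--         lb = y & -y            # lowest set bit
--         total += s[lb.bit_length() - 1]
--         y &= y - 1             # clear it
--     if total > memory:
--         return memory
--     return memory - total
-- ===== Notes on version B (the rewrite author's own statement) =====
-- stated objective: alternative
-- what changed: B enumerates only the set bits of x with Kernighan's trick (lowest set bit via y & -y, cleared via y &= y-1, index via bit_length), accumulating a total and clamping once at the end, instead of A's per-position scan that shifts x right one bit at a time while subtracting in place.
import Mathlib
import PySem

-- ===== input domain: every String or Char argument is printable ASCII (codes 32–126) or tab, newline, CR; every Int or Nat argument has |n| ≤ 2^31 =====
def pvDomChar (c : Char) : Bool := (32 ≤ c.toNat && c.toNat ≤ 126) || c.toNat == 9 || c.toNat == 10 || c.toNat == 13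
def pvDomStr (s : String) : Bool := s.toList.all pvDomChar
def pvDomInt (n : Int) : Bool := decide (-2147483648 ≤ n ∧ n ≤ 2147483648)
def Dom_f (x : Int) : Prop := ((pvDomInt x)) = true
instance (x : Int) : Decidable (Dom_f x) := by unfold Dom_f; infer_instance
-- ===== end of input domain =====

-- B replaces A's bit-by-bit right-shift scan by Kernighan's jump between set bits,
-- accumulating a total and clamping once at the end (objective: alternative).

-- module constant s (shared table of both programs)
def fS : List Int := [173669, 275487, 1197613, 1549805, 502334, 217684, 1796841, 274708,
     631252, 148665, 150254, 4784408, 344759, 440109, 4198037, 329673, 28602,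
     144173, 1461469, 187895, 369313, 959307, 1482335, 2772513, 1313997, 254845,
     486167, 2667146, 264004, 297223, 94694, 1757457, 576203, 8577828, 498382,
     8478177, 123575, 4062389, 3001419, 196884, 617991, 421056, 3017627, 131936,
     1152730, 2676649, 656678, 4519834, 201919, 56080, 2142553, 326263, 8172117,
     2304253, 4761871, 205387, 6148422, 414559, 2893305, 2158562, 465972, 304078,
     1841018, 1915571]

-- memory = int(math.pow(2, 26)) = 67108864 (exact power of two, float is exact)
def fMemory : Int := 67108864

-- ===== PORT A =====
-- while ret_x > 0: if ret_x & 1 == 1: f_num -= s[i]; i += 1; ret_x >>= 1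
-- s[i] is in range for every i the loop reaches on Dom (|x| ≤ 2^31 ⇒ i ≤ 31 < 64),
-- so the IndexError branch of pyGet? is unreachable; .getD 0 never fires.
def fLoopA (retx i fnum : Int) : Int :=
  if retx > 0 then
    fLoopA (retx >>> (1 : Nat)) (i + 1)
      (if PySem.Int.band retx 1 = 1 then fnum - (PySem.List.pyGet? fS i).getD 0 else fnum)
  else fnum
termination_by retx.toNat
decreasing_by
  have h2 : retx >>> (1 : Nat) = retx / 2 := by
    rw [Int.shiftRight_eq_div_pow]; norm_num
  rw [h2]; omega

def f (x : Int) : Int :=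
  let fnum := fLoopA x 0 fMemory
  if fnum < 0 then fMemory else fnum

-- ===== PORT B =====
-- while y > 0: lb = y & -y; total += s[lb.bit_length() - 1]; y &= y - 1
-- (same unreachable-IndexError remark as in port A: bit indices stay below 64 on Dom)
def fLoopB (y total : Int) : Int :=
  if y > 0 then
    fLoopB (PySem.Int.band y (y - 1))
      (total + (PySem.List.pyGet? fS
        ((PySem.Int.bitLength (PySem.Int.band y (-y)) : Int) - 1)).getD 0)
  else total
termination_by y.toNat
decreasing_by
  have hb : PySem.Int.band y (y - 1) = ((y.toNat &&& (y - 1).toNat : Nat) : Int) :=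
    PySem.Int.band_of_nonneg (by omega) (by omega)
  have hle : y.toNat &&& (y - 1).toNat ≤ (y - 1).toNat := Nat.and_le_right
  rw [hb]; omega

def f_alt (x : Int) : Int :=
  let total := fLoopB x 0
  if total > fMemory then fMemory else fMemory - total

-- ===== PRECONDITION & SPEC =====
def Spec_f (x : Int) (out : Int) : Prop := out = f_alt x
instance (x : Int) (out : Int) : Decidable (Spec_f x out) := by unfold Spec_f; infer_instance

-- ===== CLAIM (what is proved, stated in full; the proofs are below) =====
def Claim_equal_f : Prop := ∀ (x : Int), Dom_f x → Spec_f x (f x)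

-- ===== LEMMAS AND PROOFS =====

-- s-value at a (Nat) bit position, 0 past the table (never reached by either loop on Dom)
def fSv (i : Nat) : Int := (PySem.List.pyGet? fS (i : Int)).getD 0

-- the sum of s-values selected by the set bits of n, the common mathematical content
def fBitSum (n i : Nat) : Int :=
  if n = 0 then 0
  else (if n % 2 = 1 then fSv i else 0) + fBitSum (n / 2) (i + 1)
termination_by n
decreasing_by exact Nat.div_lt_self (by omega) (by omega)

lemma fBitSum_eq (n i : Nat) (h : n ≠ 0) :
    fBitSum n i = (if n % 2 = 1 then fSv i else 0) + fBitSum (n / 2) (i + 1) := by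
  rw [fBitSum, if_neg h]

lemma fLoopA_eq (n : Nat) : ∀ (i : Nat) (fnum : Int),
    fLoopA (n : Int) (i : Int) fnum = fnum - fBitSum n i := by
  induction n using Nat.strong_induction_on with
  | _ n ih =>
    intro i fnum
    rw [fLoopA]
    by_cases hn : n = 0
    · subst hn; rw [fBitSum]; simp
    · rw [fBitSum_eq n i hn]
      have hpos : (n : Int) > 0 := by exact_mod_cast Nat.pos_of_ne_zero hn
      rw [if_pos hpos]
      have hband : PySem.Int.band (n : Int) 1 = ((n &&& 1 : Nat) : Int) := by
        exact_mod_cast PySem.Int.band_natCast n 1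
      have hmod : n &&& 1 = n % 2 := Nat.and_one_is_mod n
      have hshift : (n : Int) >>> (1 : Nat) = ((n / 2 : Nat) : Int) := by
        rw [Int.shiftRight_eq_div_pow]; push_cast; norm_num
      have hi : (i : Int) + 1 = ((i + 1 : Nat) : Int) := by push_cast; ring
      rw [hband, hmod, hshift, hi, ih (n / 2) (Nat.div_lt_self (Nat.pos_of_ne_zero hn) (by omega))]
      by_cases hpar : n % 2 = 1
      · rw [if_pos (by exact_mod_cast hpar), if_pos hpar]
        show fnum - fSv i - fBitSum (n / 2) (i + 1) = fnum - (fSv i + fBitSum (n / 2) (i + 1))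
        ring
      · have h0 : ((n % 2 : Nat) : Int) ≠ 1 := by omega
        rw [if_neg h0, if_neg hpar]
        ring

-- Kernighan's step on (2k+1)·2^i: the clear-lowest-bit mask
lemma fAndPred (i : Nat) : ∀ (k : Nat),
    ((2 * k + 1) * 2 ^ i) &&& ((2 * k + 1) * 2 ^ i - 1) = (2 * k) * 2 ^ i := by
  induction i with
  | zero =>
    intro k
    simpa [Nat.bit, Nat.mul_comm, Nat.and_self] using Nat.land_bit true k false k
  | succ i ih =>
    intro k
    have hm : 0 < (2 * k + 1) * 2 ^ i := by positivity
    set m := (2 * k + 1) * 2 ^ i with hmdef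
    have h1 : (2 * k + 1) * 2 ^ (i + 1) = 2 * m := by rw [hmdef]; ring
    have h2 : 2 * m - 1 = 2 * (m - 1) + 1 := by omega
    have h3 : (2 * m) &&& (2 * (m - 1) + 1) = 2 * (m &&& (m - 1)) := by
      simpa [Nat.bit, Nat.mul_comm] using Nat.land_bit false m true (m - 1)
    rw [h1, h2, h3, ih k]
    ring

lemma fBitLenPow (i : Nat) : PySem.Int.bitLength ((2 ^ i : Nat) : Int) = i + 1 := by
  induction i with
  | zero => decide
  | succ i ih =>
    rw [PySem.Int.bitLength_natCast (m := 2 ^ (i + 1)) (by positivity)]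
    have : 2 ^ (i + 1) / 2 = 2 ^ i := by
      rw [pow_succ]
      omega
    rw [this, ih]

lemma fLoopB_eq (m : Nat) : ∀ (i : Nat) (total : Int),
    fLoopB ((m * 2 ^ i : Nat) : Int) total = total + fBitSum m i := by
  induction m using Nat.strong_induction_on with
  | _ m ih =>
    intro i total
    by_cases hm : m = 0
    · subst hm
      rw [fLoopB, fBitSum]
      simp
    · rcases Nat.even_or_odd m with ⟨k, hk⟩ | ⟨k, hk⟩
      · -- m = 2k even, k < m, just re-associate the power and recurse
        have hk' : m = 2 * k := by omega
        have hkm : k < m := by omega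
        have harg : m * 2 ^ i = k * 2 ^ (i + 1) := by rw [hk']; ring
        rw [harg, ih k hkm (i + 1) total, fBitSum_eq m i hm]
        have h1 : ¬ (m % 2 = 1) := by omega
        have h2 : m / 2 = k := by omega
        rw [if_neg h1, h2]
        ring
      · -- m = 2k+1 odd: one Kernighan step clears bit i
        have hkm : k < m := by omega
        set n := m * 2 ^ i with hndef
        have hnval : n = (2 * k + 1) * 2 ^ i := by rw [hndef, hk]
        have hnpos : 0 < n := by rw [hnval]; positivity
        have hand : n &&& (n - 1) = (2 * k) * 2 ^ i := by rw [hnval]; exact fAndPred i k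
        rw [fLoopB]
        have hpos : ((n : Nat) : Int) > 0 := by exact_mod_cast hnpos
        rw [if_pos hpos]
        -- y & (y-1)
        have hsub : ((n : Nat) : Int) - 1 = ((n - 1 : Nat) : Int) := by
          push_cast [Nat.cast_sub hnpos]; ring
        have hband1 : PySem.Int.band ((n : Nat) : Int) (((n : Nat) : Int) - 1)
            = (((2 * k) * 2 ^ i : Nat) : Int) := by
          rw [hsub]
          rw [show (PySem.Int.band ((n : Nat) : Int) ((n - 1 : Nat) : Int))
              = ((n &&& (n - 1) : Nat) : Int) from by exact_mod_cast PySem.Int.band_natCast n (n - 1)]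
          rw [hand]
        -- y & -y = lowest set bit = 2^i
        have hlow : n - (n &&& (n - 1)) = 2 ^ i := by
          rw [hand, hnval, show (2 * k + 1) * 2 ^ i = 2 * k * 2 ^ i + 2 ^ i from by ring]
          exact Nat.add_sub_cancel_left _ _
        have hband2 : PySem.Int.band ((n : Nat) : Int) (-((n : Nat) : Int))
            = ((2 ^ i : Nat) : Int) := by
          unfold PySem.Int.band
          rw [if_pos (by positivity), if_neg (by omega)]
          have h1 : (-(-((n : Nat) : Int)) - 1).toNat = n - 1 := by omega
          have h2 : ((n : Nat) : Int).toNat = n := by omega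
          rw [h1, h2, hlow]
        have hbl : ((PySem.Int.bitLength (PySem.Int.band ((n : Nat) : Int) (-((n : Nat) : Int))) : Nat) : Int) - 1
            = ((i : Nat) : Int) := by
          rw [hband2, fBitLenPow]; push_cast; ring
        rw [hband1, hbl]
        have harg2 : (2 * k) * 2 ^ i = k * 2 ^ (i + 1) := by ring
        rw [harg2, ih k hkm (i + 1) (total + (PySem.List.pyGet? fS ((i : Nat) : Int)).getD 0)]
        rw [fBitSum_eq m i hm]
        have hodd : m % 2 = 1 := by omega
        have hdiv : m / 2 = k := by omega
        rw [if_pos hodd, hdiv]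
        simp only [fSv]
        ring

-- ===== VERDICT (by name: the statement is the Claim_ definition above) =====
theorem f_spec : Claim_equal_f := by
  intro x _
  unfold Spec_f
  simp only [f, f_alt]
  by_cases hx : 0 < x
  · have hxeq : x = ((x.toNat : Nat) : Int) := by omega
    have hA := fLoopA_eq x.toNat 0 fMemory
    have hB := fLoopB_eq x.toNat 0 0
    rw [pow_zero, mul_one] at hB
    push_cast at hA
    rw [hxeq, hA, hB]
    have hM : fMemory = 67108864 := rfl
    set T := fBitSum x.toNat 0
    split_ifs <;> omega
  · rw [fLoopA, fLoopB]
    have hM : fMemory = 67108864 := rfl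
    simp only [if_neg hx]
    split_ifs <;> omega
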